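-- pv_equiv track=rewrite | github.com/hyeonzi423/Algorithm | 프로그래머스/unrated/138477. 명예의 전당 （1）/명예의 전당 （1）.py | solution
-- ===== SOURCE A (Python) =====
-- import heapq
--
-- def solution(k, score):
--     heap, res = [], []
--     for i in score:
--         if len(heap) == k:
--             if heap[0] >= i:
--                 res.append(heap[0])
--             else:
--                 heapq.heappop(heap)
--                 heapq.heappush(heap, i)
--                 res.append(heap[0])
--         else:
--             heapq.heappush(heap, i)
--             res.append(heap[0])
--     return res
-- ===== SOURCE B (Python) =====
-- def solution(k, score):
--     # Maintain an ascending sorted list `top` of the kept (at most k) best scores;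
--     # the answer after each score is its first element, the k-th highest so far.
--     top, res = [], []
--     for s in score:
--         for j in range(len(top)):          # insert s keeping `top` ascending
--             if s <= top[j]:
--                 top.insert(j, s)
--                 break
--         else:
--             top.append(s)
--         if len(top) > k:
--             del top[0]
--         res.append(top[0])
--     return res
-- ===== Notes on version B (the rewrite author's own statement) =====
-- stated objective: simpler
-- what changed: Replaces the heap (heapq push/pop with a peek-compare-replace branch) by a plain ascending sorted list: insert each score in order, drop the smallest when more than k are kept, and read the answer at index 0.
-- outside the precondition, e.g. on solution(-1, [3, 1]): A returns [3, 1], B raises IndexError; on solution(0, [3]): A raises IndexError, B raises IndexError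
import Mathlib
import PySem

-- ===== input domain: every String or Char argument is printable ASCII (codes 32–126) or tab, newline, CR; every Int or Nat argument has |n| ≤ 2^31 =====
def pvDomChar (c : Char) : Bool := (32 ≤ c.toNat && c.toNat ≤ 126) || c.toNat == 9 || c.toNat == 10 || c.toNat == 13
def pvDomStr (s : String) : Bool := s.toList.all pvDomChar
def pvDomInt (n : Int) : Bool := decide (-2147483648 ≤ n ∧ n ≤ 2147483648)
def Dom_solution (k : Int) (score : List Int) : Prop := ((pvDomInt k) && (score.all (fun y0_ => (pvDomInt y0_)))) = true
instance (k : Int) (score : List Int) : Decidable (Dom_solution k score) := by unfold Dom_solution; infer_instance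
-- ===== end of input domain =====

-- B replaces A's heapq min-heap with a plain ascending sorted list (insert in order, drop
-- index 0 when more than k are kept, answer = index 0): simpler, no heap machinery.

-- ===== PORT A =====
-- A observes its heap only through heap[0] (the minimum) and the heap's multiset of elements:
-- heapq.heappush adds i, heapq.heappop removes the minimum, heap[0] reads it.  We model the
-- heap by its element list with these three operations; this is exact for this program, which
-- never inspects any other heap position.
-- heap[0]; the default 0 is read only when the heap is empty, where Python raises (outside Pre_).
def heapRoot (heap : List Int) : Int := heap.min?.getD 0
def heapPush (heap : List Int) (i : Int) : List Int := heap ++ [i]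
def heapPop (heap : List Int) : List Int := heap.erase (heapRoot heap)

def solGoA (k : Int) (score heap res : List Int) : List Int :=
  match score with
  | [] => res
  | i :: rest =>
    if (heap.length : Int) = k then
      if heapRoot heap ≥ i then
        solGoA k rest heap (res ++ [heapRoot heap])
      else
        let h2 := heapPush (heapPop heap) i
        solGoA k rest h2 (res ++ [heapRoot h2])
    else
      let h2 := heapPush heap i
      solGoA k rest h2 (res ++ [heapRoot h2])

def solution (k : Int) (score : List Int) : List Int := solGoA k score [] []

-- ===== PORT B =====
-- Source B's left-to-right scan 'insert s before the first element ≥ s, else append' is exactly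
-- List.orderedInsert (· ≤ ·); 'del top[0]' is .tail; 'top[0]' is .headD 0 (the default 0 is
-- read only when top is empty, where Python raises — outside Pre_).
def solGoB (k : Int) (score top res : List Int) : List Int :=
  match score with
  | [] => res
  | s :: rest =>
    let t1 := List.orderedInsert (· ≤ ·) s top
    let t2 := if (t1.length : Int) > k then t1.tail else t1
    solGoB k rest t2 (res ++ [t2.headD 0])

def solution_alt (k : Int) (score : List Int) : List Int := solGoB k score [] []

-- ===== PRECONDITION & SPEC =====
-- Pre_ excludes k ≤ 0 with a nonempty score list: there A raises IndexError at k = 0 and, for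
-- negative k, returns the running minimum only because its 'len(heap)==k' guard never fires,
-- while B's natural trim empties its list and raises IndexError.
def Pre_solution (k : Int) (score : List Int) : Prop := 1 ≤ k ∨ score = []
instance (k : Int) (score : List Int) : Decidable (Pre_solution k score) := by unfold Pre_solution; infer_instance
def pvWitness_solution : Int × List Int := (3, [10, 100, 20, 150, 1, 100, 200])

def Spec_solution (k : Int) (score : List Int) (out : List Int) : Prop := out = solution_alt k score
instance (k : Int) (score : List Int) (out : List Int) : Decidable (Spec_solution k score out) := by unfold Spec_solution; infer_instance

-- ===== CLAIM (what is proved, stated in full; the proofs are below) =====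
def Claim_equal_solution : Prop := ∀ (k : Int) (score : List Int), Dom_solution k score → Pre_solution k score → Spec_solution k score (solution k score)

-- ===== LEMMAS AND PROOFS =====

theorem min?_congr_perm {l₁ l₂ : List Int} (p : l₁.Perm l₂) : l₁.min? = l₂.min? := by
  cases h : l₁.min? with
  | none =>
    rw [List.min?_eq_none_iff] at h
    subst h
    rw [← p.nil_eq]
    simp
  | some a =>
    rw [List.min?_eq_some_iff] at h
    symm
    rw [List.min?_eq_some_iff]
    exact ⟨p.mem_iff.mp h.1, fun b hb => h.2 b (p.mem_iff.mpr hb)⟩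

theorem foldl_min_of_le (h : Int) (t : List Int) (H : ∀ x ∈ t, h ≤ x) : t.foldl min h = h := by
  induction t with
  | nil => rfl
  | cons a t ih =>
    have : min h a = h := min_eq_left (H a (by simp))
    simp only [List.foldl_cons, this]
    exact ih (fun x hx => H x (by simp [hx]))

theorem min?_of_sorted (h : Int) (t : List Int) (hs : (h :: t).Pairwise (· ≤ ·)) :
    (h :: t).min? = some h := by
  have H : ∀ x ∈ t, h ≤ x := (List.pairwise_cons.mp hs).1
  simp [List.min?, foldl_min_of_le h t H]

-- a sorted nonempty list: its minimum is its head
theorem headD_eq_min (l : List Int) (hs : l.Pairwise (· ≤ ·)) (hne : l ≠ []) :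
    l.headD 0 = l.min?.getD 0 := by
  cases l with
  | nil => exact absurd rfl hne
  | cons h t => rw [min?_of_sorted h t hs]; rfl

theorem go_eq (k : Int) (hk : 1 ≤ k) :
    ∀ (score heap top res : List Int), heap.Perm top → top.Pairwise (· ≤ ·) →
      (top.length : Int) ≤ k → solGoA k score heap res = solGoB k score top res := by
  intro score
  induction score with
  | nil => intro heap top res _ _ _; rfl
  | cons i rest ih =>
    intro heap top res hperm hsort hlen
    have hlp : heap.length = top.length := hperm.length_eq
    have hmin : heap.min? = top.min? := min?_congr_perm hperm
    by_cases hfull : (heap.length : Int) = k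
    · -- heap is full: top has length k ≥ 1, so top = h :: t with minimum h
      have htoplen : (top.length : Int) = k := by rw [← hlp]; exact hfull
      obtain ⟨h, t, rfl⟩ : ∃ h t, top = h :: t := by
        cases top with
        | nil => exfalso; simp at htoplen; omega
        | cons h t => exact ⟨h, t, rfl⟩
      have hmins : (h :: t).min? = some h := min?_of_sorted h t hsort
      have hroot : heapRoot heap = h := by
        unfold heapRoot; rw [hmin, hmins]; rfl
      have ht1len : ((List.orderedInsert (· ≤ ·) i (h :: t)).length : Int) = k + 1 := by
        rw [List.orderedInsert_length]; push_cast; omega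
      simp only [solGoA, solGoB]
      rw [if_pos hfull]
      by_cases hge : heapRoot heap ≥ i
      · -- i ≤ root: A keeps the heap; B's insert-then-trim restores top
        have hle : i ≤ h := hroot ▸ hge
        have hins : List.orderedInsert (· ≤ ·) i (h :: t) = i :: h :: t := by
          simp [List.orderedInsert, hle]
        rw [if_pos hge]
        have ht2 : (if (((List.orderedInsert (· ≤ ·) i (h :: t)).length : Int) > k)
            then (List.orderedInsert (· ≤ ·) i (h :: t)).tail
            else List.orderedInsert (· ≤ ·) i (h :: t)) = h :: t := by
          rw [if_pos (by omega : ((List.orderedInsert (· ≤ ·) i (h :: t)).length : Int) > k), hins]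
          rfl
        rw [ht2, hroot]
        exact ih heap (h :: t) (res ++ [h]) hperm hsort hlen
      · -- root < i: A pops the root and pushes i; B inserts i and drops the head
        have hnle : ¬ i ≤ h := by
          intro hc; exact hge (hroot ▸ hc)
        rw [if_neg hge]
        have hins : List.orderedInsert (· ≤ ·) i (h :: t) = h :: List.orderedInsert (· ≤ ·) i t := by
          simp [List.orderedInsert, hnle]
        have ht2 : (if (((List.orderedInsert (· ≤ ·) i (h :: t)).length : Int) > k)
            then (List.orderedInsert (· ≤ ·) i (h :: t)).tail
            else List.orderedInsert (· ≤ ·) i (h :: t)) = List.orderedInsert (· ≤ ·) i t := by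
          rw [if_pos (by omega : ((List.orderedInsert (· ≤ ·) i (h :: t)).length : Int) > k), hins]
          rfl
        rw [ht2]
        -- the new states are permutations of each other
        have hperase : (heapPop heap).Perm t := by
          unfold heapPop
          rw [hroot]
          have := List.Perm.erase h hperm
          simpa [List.erase_cons_head] using this
        have hperm2 : (heapPush (heapPop heap) i).Perm (List.orderedInsert (· ≤ ·) i t) :=
          ((hperase.append_right [i]).trans (List.perm_append_singleton i t)).trans
            (List.perm_orderedInsert _ i t).symm
        have hsort2 : (List.orderedInsert (· ≤ ·) i t).Pairwise (· ≤ ·) :=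
          List.Pairwise.orderedInsert i t (List.pairwise_cons.mp hsort).2
        have hlen2 : ((List.orderedInsert (· ≤ ·) i t).length : Int) ≤ k := by
          rw [List.orderedInsert_length]
          simp only [List.length_cons] at htoplen; push_cast at htoplen ⊢; omega
        have hne2 : List.orderedInsert (· ≤ ·) i t ≠ [] := by
          intro hc
          have := List.orderedInsert_length (· ≤ ·) t i
          rw [hc] at this; simp at this
        have hroot2 : heapRoot (heapPush (heapPop heap) i)
            = (List.orderedInsert (· ≤ ·) i t).headD 0 := by
          unfold heapRoot
          rw [min?_congr_perm hperm2, headD_eq_min _ hsort2 hne2]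
        rw [hroot2]
        exact ih _ _ _ hperm2 hsort2 hlen2
    · -- heap not full: both sides just insert i
      have htoplen : (top.length : Int) ≠ k := by rw [← hlp]; exact hfull
      simp only [solGoA, solGoB]
      rw [if_neg hfull]
      have hnot : ¬ (((List.orderedInsert (· ≤ ·) i top).length : Int) > k) := by
        rw [List.orderedInsert_length]; push_cast; omega
      rw [if_neg hnot]
      have hperm2 : (heapPush heap i).Perm (List.orderedInsert (· ≤ ·) i top) :=
        ((hperm.append_right [i]).trans (List.perm_append_singleton i top)).trans
          (List.perm_orderedInsert _ i top).symm
      have hsort2 : (List.orderedInsert (· ≤ ·) i top).Pairwise (· ≤ ·) :=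
        List.Pairwise.orderedInsert i top hsort
      have hlen2 : ((List.orderedInsert (· ≤ ·) i top).length : Int) ≤ k := by
        rw [List.orderedInsert_length]; push_cast; omega
      have hne2 : List.orderedInsert (· ≤ ·) i top ≠ [] := by
        intro hc
        have := List.orderedInsert_length (· ≤ ·) top i
        rw [hc] at this; simp at this
      have hroot2 : heapRoot (heapPush heap i) = (List.orderedInsert (· ≤ ·) i top).headD 0 := by
        unfold heapRoot
        rw [min?_congr_perm hperm2, headD_eq_min _ hsort2 hne2]
      rw [hroot2]
      exact ih _ _ _ hperm2 hsort2 hlen2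

-- ===== VERDICT (by name: the statement is the Claim_ definition above) =====
theorem solution_spec : Claim_equal_solution := by
  intro k score _ hpre
  unfold Spec_solution solution solution_alt
  rcases hpre with hk | hnil
  · exact go_eq k hk score [] [] [] (List.Perm.refl _) (by simp) (by simp; omega)
  · subst hnil; rfl
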